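-- pv_equiv track=rewrite | github.com/ivanromanv/manuales | Python/Edx_Course/Introduction to Programming Using Python/Excercises/W6_Strings_E7_conteo_caracter_comun.py | funcion_conteo_caracter_comun
-- ===== SOURCE A (Python) =====
-- def funcion_conteo_caracter_comun(input_string):
--     input_string = input_string.lower()
--     input_string = input_string.replace(" ","")
--     sample_character = None
--     sample_maximum_count = 0
--     for x in input_string:
--         cont_letra = input_string.count(x)
--         if cont_letra >= sample_maximum_count:
--             sample_maximum_count = cont_letra
--             sample_character = x
--     return sample_character
-- ===== SOURCE B (Python) =====
-- def funcion_conteo_caracter_comun(input_string):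
--     clean = input_string.lower().replace(" ", "")
--     if not clean:
--         return None
--     counts = {}
--     for c in clean:
--         counts[c] = counts.get(c, 0) + 1
--     best = max(counts.values())
--     for c in reversed(clean):
--         if counts[c] == best:
--             return c
-- ===== Notes on version B (the rewrite author's own statement) =====
-- stated objective: faster
-- what changed: Replaces A's quadratic running-max loop (str.count called per character) with a one-pass frequency dict, a separate max over the counts, and a reverse scan for the last character reaching that maximum.
import Mathlib
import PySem

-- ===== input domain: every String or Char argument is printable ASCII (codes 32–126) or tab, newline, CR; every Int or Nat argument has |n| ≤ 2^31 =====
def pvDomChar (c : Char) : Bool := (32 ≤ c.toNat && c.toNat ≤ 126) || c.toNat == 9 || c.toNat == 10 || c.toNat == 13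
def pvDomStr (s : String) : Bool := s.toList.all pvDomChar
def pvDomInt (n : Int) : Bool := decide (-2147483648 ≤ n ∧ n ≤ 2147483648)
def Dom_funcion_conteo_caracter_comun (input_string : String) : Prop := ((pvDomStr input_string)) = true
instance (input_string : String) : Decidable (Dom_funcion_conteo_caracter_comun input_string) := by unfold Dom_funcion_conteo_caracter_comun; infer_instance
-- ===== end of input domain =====

-- B replaces A's quadratic running-max loop (str.count per character) with a one-pass
-- frequency dict, a max over the counts, and a reverse scan for the last maximal character.


-- ===== PORT A =====
-- literal port of A: lower, drop spaces, then one forward loop keeping a running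
-- maximum (>= so later ties win); input_string.count(x) for the 1-char string x is
-- exactly the character count of the cleaned list (exact, x is a single character)
def pvStepA (cs : List Char) (st : Option String × Int) (x : Char) : Option String × Int :=
  if (cs.count x : Int) ≥ st.2 then (some (String.ofList [x]), (cs.count x : Int)) else st

def funcion_conteo_caracter_comun (input_string : String) : Option String :=
  let cs := (PySem.Str.replace (PySem.Str.lower input_string) " " "").toList
  (cs.foldl (pvStepA cs) (none, 0)).1

-- ===== PORT B =====
-- literal port of Source B: clean, empty guard, frequency dict in one pass,
-- best = max(counts.values()) (some, since the dict is nonempty here),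
-- then the first character of the reversed clean string whose count is best.
-- counts[c] inside the scan cannot raise (c ∈ clean), so getD is exact there.
def funcion_conteo_caracter_comun_alt (input_string : String) : Option String :=
  let cs := (PySem.Str.replace (PySem.Str.lower input_string) " " "").toList
  if cs.isEmpty then none
  else
    let counts := cs.foldl (fun (d : PySem.Dict Char Int) c => d.insert c (d.getD c 0 + 1))
      PySem.Dict.empty
    match PySem.List.max? counts.values (fun v => v) with
    | none => none  -- unreachable: cs ≠ [] so the dict has a value
    | some best =>
        (cs.reverse.find? (fun c => counts.getD c 0 == best)).map (fun c => String.ofList [c])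

-- ===== PRECONDITION & SPEC =====
def Spec_funcion_conteo_caracter_comun (input_string : String) (out : Option String) : Prop := out = funcion_conteo_caracter_comun_alt input_string
instance (input_string : String) (out : Option String) : Decidable (Spec_funcion_conteo_caracter_comun input_string out) := by unfold Spec_funcion_conteo_caracter_comun; infer_instance

-- ===== CLAIM (what is proved, stated in full; the proofs are below) =====
def Claim_equal_funcion_conteo_caracter_comun : Prop := ∀ (input_string : String), Dom_funcion_conteo_caracter_comun input_string → Spec_funcion_conteo_caracter_comun input_string (funcion_conteo_caracter_comun input_string)

-- ===== LEMMAS AND PROOFS =====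

-- A's running-max fold over l (counts taken in the fixed list cs) yields, for l ≠ [],
-- a state whose count component bounds every count in l and is attained, and whose
-- character component is the LAST element of l attaining it (= first of l.reverse).
lemma pvFoldA (cs : List Char) (l : List Char) (hl : l ≠ []) :
    (∀ c ∈ l, (cs.count c : Int) ≤ (l.foldl (pvStepA cs) (none, 0)).2) ∧
    (∃ c ∈ l, (cs.count c : Int) = (l.foldl (pvStepA cs) (none, 0)).2) ∧
    (l.foldl (pvStepA cs) (none, 0)).1 =
      (l.reverse.find? (fun c => (cs.count c : Int) == (l.foldl (pvStepA cs) (none, 0)).2)).map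
        (fun c => String.ofList [c]) := by
  induction l using List.reverseRecOn with
  | nil => exact absurd rfl hl
  | append_singleton l x ih =>
    rcases eq_or_ne l [] with rfl | hlne
    · refine ⟨?_, ⟨x, by simp, ?_⟩, ?_⟩ <;>
        simp [pvStepA, Nat.cast_nonneg]
    · obtain ⟨hbd, ⟨c0, hc0, hc0eq⟩, hfind⟩ := ih hlne
      rw [List.foldl_append, List.foldl_cons, List.foldl_nil]
      by_cases h : (cs.count x : Int) ≥ (l.foldl (pvStepA cs) (none, 0)).2
      · rw [show pvStepA cs (l.foldl (pvStepA cs) (none, 0)) x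
              = (some (String.ofList [x]), (cs.count x : Int)) from by rw [pvStepA, if_pos h]]
        refine ⟨?_, ⟨x, by simp, rfl⟩, ?_⟩
        · intro c hc
          rcases List.mem_append.mp hc with hc | hc
          · exact le_trans (hbd c hc) h
          · simp at hc; subst hc; rfl
        · rw [List.reverse_append]
          simp
      · rw [show pvStepA cs (l.foldl (pvStepA cs) (none, 0)) x
              = l.foldl (pvStepA cs) (none, 0) from by rw [pvStepA, if_neg h]]
        push Not at h
        refine ⟨?_, ⟨c0, by simp [hc0], hc0eq⟩, ?_⟩
        · intro c hc
          rcases List.mem_append.mp hc with hc | hc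
          · exact hbd c hc
          · simp at hc; subst hc; exact le_of_lt h
        · have hx : ((cs.count x : Int) == (l.foldl (pvStepA cs) (none, 0)).2) = false := by
            simp [ne_of_lt h]
          rw [List.reverse_append]
          simp [hx, hfind]

-- the two ports agree at the list level: A's fold is B's max-then-reverse-scan
lemma pvCore (cs : List Char) :
    (cs.foldl (pvStepA cs) (none, 0)).1 =
      if cs.isEmpty then none
      else
        match PySem.List.max?
            (cs.foldl (fun (d : PySem.Dict Char Int) c => d.insert c (d.getD c 0 + 1))
              PySem.Dict.empty).values (fun v => v) with
        | none => none
        | some best =>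
            (cs.reverse.find? (fun c =>
              (cs.foldl (fun (d : PySem.Dict Char Int) c => d.insert c (d.getD c 0 + 1))
                PySem.Dict.empty).getD c 0 == best)).map (fun c => String.ofList [c]) := by
  rcases eq_or_ne cs [] with rfl | h
  · rfl
  · obtain ⟨hbd, ⟨c0, hc0, hc0eq⟩, hfind⟩ := pvFoldA cs cs h
    rw [PySem.Dict.foldl_insert_getD_add_one_eq_counter, if_neg (by simp [h])]
    have hvals : (PySem.Dict.counter cs).values
        = (PySem.Set.ofList cs).map (fun k => (cs.count k : Int)) := by
      rw [PySem.Dict.values_eq_map_keys _ (PySem.Dict.nodup_keys_counter cs) 0,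
        PySem.Dict.keys_counter]
      simp [PySem.Dict.getD_counter]
    cases hbest : PySem.List.max? (PySem.Dict.counter cs).values (fun v => v) with
    | none =>
        exfalso
        have hemp := (PySem.List.max?_eq_none_iff _ _).mp hbest
        rw [hvals] at hemp
        have hm : c0 ∈ PySem.Set.ofList cs := (PySem.Set.mem_ofList _ _).mpr hc0
        simp_all
    | some best =>
        have hmemb : best ∈ (PySem.Dict.counter cs).values := PySem.List.max?_mem hbest
        have hble : best ≤ (cs.foldl (pvStepA cs) (none, 0)).2 := by
          rw [hvals] at hmemb
          obtain ⟨k, hk, hkeq⟩ := List.mem_map.mp hmemb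
          exact hkeq ▸ hbd k ((PySem.Set.mem_ofList _ _).mp hk)
        have hleb : (cs.foldl (pvStepA cs) (none, 0)).2 ≤ best := by
          have hc0v : (cs.count c0 : Int) ∈ (PySem.Dict.counter cs).values := by
            rw [hvals]
            exact List.mem_map.mpr ⟨c0, (PySem.Set.mem_ofList _ _).mpr hc0, rfl⟩
          exact hc0eq ▸ PySem.List.max?_isMax hbest _ hc0v
        rw [hfind, le_antisymm hble hleb]
        simp [PySem.Dict.getD_counter]

-- ===== VERDICT (by name: the statement is the Claim_ definition above) =====
theorem funcion_conteo_caracter_comun_spec : Claim_equal_funcion_conteo_caracter_comun := by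
  intro s _
  exact pvCore ((PySem.Str.replace (PySem.Str.lower s) " " "").toList)
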